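-- pv_equiv track=rewrite | github.com/sequoiar/scenic | py/scenic/network.py | _has_alpha_xor_digits
-- ===== SOURCE A (Python) =====
-- def _has_alpha_xor_digits(ip):
--     """
--     Ensures that an IP address' fields (separated by .'s)
--     are either strictly alphabetic characters of strictly
--     numeric characters.
--     @param address: str IP to check
--     @ret bool
--     """
--     has_alpha = False
--     has_digit = False
--     for c in ip:
--         if c != '.':
--             has_alpha |= str.isalpha(c)
--             has_digit |= str.isdigit(c)
--             if has_digit and has_alpha:
--                 return False
--     return True
-- ===== SOURCE B (Python) =====
-- def _has_alpha_xor_digits(ip):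
--     has_alpha = any(c.isalpha() for c in ip)
--     has_digit = any(c.isdigit() for c in ip)
--     return not (has_alpha and has_digit)
-- ===== Notes on version B (the rewrite author's own statement) =====
-- stated objective: simpler
-- what changed: Replaced the single fused early-exit loop carrying two mutable flags by two independent any() existence scans combined at the end; the explicit dot-skip is dropped since a dot is neither alpha nor digit.
import Mathlib
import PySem

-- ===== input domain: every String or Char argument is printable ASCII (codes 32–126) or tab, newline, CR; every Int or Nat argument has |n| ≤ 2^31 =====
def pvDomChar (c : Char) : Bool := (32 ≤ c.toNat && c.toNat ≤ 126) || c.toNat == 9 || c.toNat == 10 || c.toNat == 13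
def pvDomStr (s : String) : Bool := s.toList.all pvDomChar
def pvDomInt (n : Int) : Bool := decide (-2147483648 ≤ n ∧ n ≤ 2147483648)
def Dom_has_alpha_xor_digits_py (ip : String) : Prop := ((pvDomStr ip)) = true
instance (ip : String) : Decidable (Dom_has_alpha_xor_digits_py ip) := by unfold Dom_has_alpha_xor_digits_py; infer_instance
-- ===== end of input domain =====

-- B replaces A's fused early-exit loop with two flags by two independent any() scans
-- combined at the end (objective: simpler).

-- ===== PORT A =====
-- A's single loop over the characters, carrying the two mutable flags; the early
-- `return False` inside the loop is the `if hd' && ha' then false` branch.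
def pvLoopA : List Char → Bool → Bool → Bool
  | [], _, _ => true
  | c :: cs, ha, hd =>
      if c ≠ '.' then
        let ha' := ha || PySem.Chars.isalpha c
        let hd' := hd || PySem.Chars.isdigit c
        if hd' && ha' then false
        else pvLoopA cs ha' hd'
      else pvLoopA cs ha hd

def has_alpha_xor_digits_py (ip : String) : Bool :=
  pvLoopA ip.toList false false

-- ===== PORT B =====
def has_alpha_xor_digits_py_alt (ip : String) : Bool :=
  let has_alpha := ip.toList.any (fun c => PySem.Chars.isalpha c)
  let has_digit := ip.toList.any (fun c => PySem.Chars.isdigit c)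
  !(has_alpha && has_digit)

-- ===== PRECONDITION & SPEC =====
def Spec_has_alpha_xor_digits_py (ip : String) (out : Bool) : Prop := out = has_alpha_xor_digits_py_alt ip
instance (ip : String) (out : Bool) : Decidable (Spec_has_alpha_xor_digits_py ip out) := by unfold Spec_has_alpha_xor_digits_py; infer_instance

-- ===== CLAIM (what is proved, stated in full; the proofs are below) =====
def Claim_equal_has_alpha_xor_digits_py : Prop := ∀ (ip : String), Dom_has_alpha_xor_digits_py ip → Spec_has_alpha_xor_digits_py ip (has_alpha_xor_digits_py ip)

-- ===== LEMMAS AND PROOFS =====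

-- '.' is neither alphabetic nor a digit, so A's skip of '.' is immaterial.
lemma pvDotNotAlpha : PySem.Chars.isalpha '.' = false := by decide
lemma pvDotNotDigit : PySem.Chars.isdigit '.' = false := by decide

-- Characterisation of A's loop: since the flags only ever turn on and the loop
-- exits the moment both are on, from a state where not both flags are set the loop
-- returns false exactly when both "alpha seen" and "digit seen" hold by the end.
lemma pvLoopA_char (l : List Char) (ha hd : Bool) (hinv : (ha && hd) = false) :
    pvLoopA l ha hd =
      !((ha || l.any (fun c => PySem.Chars.isalpha c)) &&
        (hd || l.any (fun c => PySem.Chars.isdigit c))) := by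
  induction l generalizing ha hd with
  | nil => simp [pvLoopA, hinv]
  | cons c cs ih =>
      by_cases hc : c = '.'
      · subst hc
        simp [pvLoopA, pvDotNotAlpha, pvDotNotDigit, ih ha hd hinv]
      · simp only [pvLoopA, if_pos (by exact hc), List.any_cons]
        split_ifs with h
        · -- both flags true after this character: A returns false here, and the
          -- final scans are also both true
          revert h
          cases ha <;> cases hd <;>
            cases hA : PySem.Chars.isalpha c <;> cases hD : PySem.Chars.isdigit c <;> simp
        · -- not both true yet: recurse with the updated flags
          rw [ih _ _ (by revert h; cases ha <;> cases hd <;>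
                cases hA : PySem.Chars.isalpha c <;> cases hD : PySem.Chars.isdigit c <;> simp)]
          simp [Bool.or_assoc]

-- ===== VERDICT (by name: the statement is the Claim_ definition above) =====
theorem has_alpha_xor_digits_py_spec : Claim_equal_has_alpha_xor_digits_py := by
  intro ip _
  unfold Spec_has_alpha_xor_digits_py has_alpha_xor_digits_py has_alpha_xor_digits_py_alt
  rw [pvLoopA_char _ _ _ rfl]
  simp
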